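-- pv_equiv track=rewrite | github.com/Sebi173/chess_engine | chess/magic/calculate_coordinates.py | calculate_coordinates_for_one_piece
-- ===== SOURCE A (Python) =====
-- def calculate_coordinates_for_one_piece(chessPieces: bin):
--     """
--     Input: ChessPieces [bin]
--     Is a binary representations of exactly one category of chess pieces
--     0b100010000
--     Output: listCoordinates [list]
--     Contains (x,y,id) tuple of every chess piece of said category, where x,y gives the positioning on the board for the frontend
--     """
--
--     binaryRepresentation = str(bin(chessPieces))
--     reversedBinaryRepresentation = binaryRepresentation[::-1]
--
--     x = 0
--     y = 0
--     listCoordinates = []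
--
--     for coordinate in reversedBinaryRepresentation:
--         if coordinate == "1":
--             #transform: translate(0px, 205px);
--             listCoordinates.append((100*x, 100*y, str(x)+str(y)))
--
--         x += 1
--         if x == 8:
--             y += 1
--             x = 0
--
--     return listCoordinates
-- ===== SOURCE B (Python) =====
-- def calculate_coordinates_for_one_piece(chessPieces: bin):
--     # Iterate the bits of the integer directly instead of building and
--     # scanning a binary string.
--     n = abs(chessPieces)
--     listCoordinates = []
--     i = 0
--     while n:
--         if n & 1:
--             x, y = i % 8, i // 8
--             listCoordinates.append((100 * x, 100 * y, str(x) + str(y)))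
--         n >>= 1
--         i += 1
--     return listCoordinates
-- ===== Notes on version B (the rewrite author's own statement) =====
-- stated objective: idiomatic
-- what changed: B iterates the integer's bits with shift/mask arithmetic instead of formatting a binary string, reversing it and scanning its characters with an x/y wrap-around counter.
import Mathlib
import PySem

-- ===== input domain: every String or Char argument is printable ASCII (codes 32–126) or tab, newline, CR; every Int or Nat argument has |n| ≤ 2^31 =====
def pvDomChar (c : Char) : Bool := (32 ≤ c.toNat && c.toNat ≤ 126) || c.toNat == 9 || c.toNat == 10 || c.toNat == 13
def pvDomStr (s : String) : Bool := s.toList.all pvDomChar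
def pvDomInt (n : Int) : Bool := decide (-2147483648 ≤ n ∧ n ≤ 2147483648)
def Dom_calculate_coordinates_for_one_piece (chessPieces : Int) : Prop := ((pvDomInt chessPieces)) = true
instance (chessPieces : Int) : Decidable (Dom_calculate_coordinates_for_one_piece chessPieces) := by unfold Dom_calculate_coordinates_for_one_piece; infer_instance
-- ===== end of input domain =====

-- B replaces A's build-a-binary-string-and-scan-it approach by direct bit arithmetic
-- on abs(chessPieces); the return values are proved equal for every Int input.

-- ===== PORT A =====

-- Binary digits of a positive natural, most significant first (helper for Python's bin();
-- exact: bin(m) for m > 0 has no leading zeros).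
def pvBinDigits (m : Nat) : List Char :=
  if m = 0 then []
  else pvBinDigits (m / 2) ++ [if m % 2 = 1 then '1' else '0']

-- Python's bin(n) as a list of characters (exact: "-0b…" for negatives, "0b0" for 0).
def pvBin (n : Int) : List Char :=
  (if n < 0 then ['-', '0', 'b'] else ['0', 'b']) ++
    (if n.natAbs = 0 then ['0'] else pvBinDigits n.natAbs)

-- A's for-loop over the reversed string: state (x, y, listCoordinates).
def pvLoopA : List Char → Int → Int → List (Int × Int × String) → List (Int × Int × String)
  | [], _, _, acc => acc
  | c :: rest, x, y, acc =>
    let acc' := if c = '1' then acc ++ [(100 * x, 100 * y, PySem.Int.toStr x ++ PySem.Int.toStr y)] else acc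
    let x' := x + 1
    if x' = 8 then pvLoopA rest 0 (y + 1) acc' else pvLoopA rest x' y acc'

def calculate_coordinates_for_one_piece (chessPieces : Int) : List (Int × Int × String) :=
  let binaryRepresentation := pvBin chessPieces
  let reversedBinaryRepresentation := binaryRepresentation.reverse
  pvLoopA reversedBinaryRepresentation 0 0 []

-- ===== PORT B =====

-- B's while-loop: n is repeatedly shifted right, i counts the bit index.
def pvLoopB (n i : Nat) : List (Int × Int × String) :=
  if n = 0 then []
  else
    (if n % 2 = 1 then
      [((100 * (i % 8 : Nat) : Int), (100 * (i / 8 : Nat) : Int),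
        PySem.Int.toStr ((i % 8 : Nat) : Int) ++ PySem.Int.toStr ((i / 8 : Nat) : Int))]
     else []) ++ pvLoopB (n / 2) (i + 1)

def calculate_coordinates_for_one_piece_alt (chessPieces : Int) : List (Int × Int × String) :=
  pvLoopB chessPieces.natAbs 0

-- ===== PRECONDITION & SPEC =====
def Spec_calculate_coordinates_for_one_piece (chessPieces : Int) (out : List (Int × Int × String)) : Prop := out = calculate_coordinates_for_one_piece_alt chessPieces
instance (chessPieces : Int) (out : List (Int × Int × String)) : Decidable (Spec_calculate_coordinates_for_one_piece chessPieces out) := by unfold Spec_calculate_coordinates_for_one_piece; infer_instance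

-- ===== CLAIM (what is proved, stated in full; the proofs are below) =====
def Claim_equal_calculate_coordinates_for_one_piece : Prop := ∀ (chessPieces : Int), Dom_calculate_coordinates_for_one_piece chessPieces → Spec_calculate_coordinates_for_one_piece chessPieces (calculate_coordinates_for_one_piece chessPieces)

-- ===== LEMMAS AND PROOFS =====

-- The trailing junk characters ('b', '0' and possibly '-') of the reversed bin string
-- emit nothing: they are never '1', whatever x/y state the loop is in.
theorem pvLoopA_junk_pos (x y : Int) (acc : List (Int × Int × String)) :
    pvLoopA ['b', '0'] x y acc = acc := by
  simp [pvLoopA]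

theorem pvLoopA_junk_neg (x y : Int) (acc : List (Int × Int × String)) :
    pvLoopA ['b', '0', '-'] x y acc = acc := by
  simp [pvLoopA]

-- Main invariant: scanning the reversed digits of m starting at bit index i
-- (so x = i % 8, y = i / 8) and then any non-emitting junk yields acc ++ pvLoopB m i.
theorem pvLoopA_eq_loopB (m : Nat) :
    ∀ (i : Nat) (acc : List (Int × Int × String)) (junk : List Char),
      (∀ x y a, pvLoopA junk x y a = a) →
      pvLoopA ((pvBinDigits m).reverse ++ junk) ((i % 8 : Nat) : Int) ((i / 8 : Nat) : Int) acc
        = acc ++ pvLoopB m i := by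
  induction m using Nat.strong_induction_on with
  | _ m ih =>
    intro i acc junk hj
    by_cases hm : m = 0
    · subst hm
      rw [pvBinDigits, pvLoopB]
      simpa using hj _ _ acc
    · rw [pvBinDigits, if_neg hm, List.reverse_append, List.reverse_singleton,
        List.singleton_append, List.cons_append, pvLoopB, if_neg hm]
      have hrec := ih (m / 2) (Nat.div_lt_self (Nat.pos_of_ne_zero hm) one_lt_two) (i + 1)
      by_cases hb : m % 2 = 1
      · rw [if_pos hb]
        simp only [pvLoopA]
        by_cases h8 : ((i % 8 : Nat) : Int) + 1 = 8
        · rw [if_pos h8]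
          have h0 : ((((i + 1) % 8 : Nat)) : Int) = 0 := by omega
          have h1 : ((((i + 1) / 8 : Nat)) : Int) = ((i / 8 : Nat) : Int) + 1 := by omega
          rw [← h0, ← h1, hrec _ _ hj]
          simp [hb]
        · rw [if_neg h8]
          have h0 : ((((i + 1) % 8 : Nat)) : Int) = ((i % 8 : Nat) : Int) + 1 := by omega
          have h1 : ((((i + 1) / 8 : Nat)) : Int) = ((i / 8 : Nat) : Int) := by omega
          rw [← h0, ← h1, hrec _ _ hj]
          simp [hb]
      · rw [if_neg hb]
        simp only [pvLoopA]
        by_cases h8 : ((i % 8 : Nat) : Int) + 1 = 8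
        · rw [if_pos h8]
          have h0 : ((((i + 1) % 8 : Nat)) : Int) = 0 := by omega
          have h1 : ((((i + 1) / 8 : Nat)) : Int) = ((i / 8 : Nat) : Int) + 1 := by omega
          rw [← h0, ← h1, hrec _ _ hj]
          simp [hb]
        · rw [if_neg h8]
          have h0 : ((((i + 1) % 8 : Nat)) : Int) = ((i % 8 : Nat) : Int) + 1 := by omega
          have h1 : ((((i + 1) / 8 : Nat)) : Int) = ((i / 8 : Nat) : Int) := by omega
          rw [← h0, ← h1, hrec _ _ hj]
          simp [hb]

-- ===== VERDICT (by name: the statement is the Claim_ definition above) =====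
theorem calculate_coordinates_for_one_piece_spec : Claim_equal_calculate_coordinates_for_one_piece := by
  intro n _
  show calculate_coordinates_for_one_piece n = calculate_coordinates_for_one_piece_alt n
  unfold calculate_coordinates_for_one_piece calculate_coordinates_for_one_piece_alt pvBin
  by_cases h0 : n.natAbs = 0
  · rw [if_pos h0, pvLoopB, if_pos h0]
    have hn : ¬ n < 0 := by omega
    rw [if_neg hn]
    simp [pvLoopA]
  · rw [if_neg h0]
    by_cases hn : n < 0
    · rw [if_pos hn]
      have h := pvLoopA_eq_loopB n.natAbs 0 [] ['b', '0', '-'] pvLoopA_junk_neg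
      simp only [List.reverse_append]
      simpa using h
    · rw [if_neg hn]
      have h := pvLoopA_eq_loopB n.natAbs 0 [] ['b', '0'] pvLoopA_junk_pos
      simp only [List.reverse_append]
      simpa using h
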